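-- pv_equiv track=rewrite | github.com/iancward/advent_of_code_2015 | 5/part2.py | repeating_pair
-- ===== SOURCE A (Python) =====
-- def repeating_pair(s):
--     repeating_chars = 0
--     for i in range(1,len(s)):
--         if s[i] == s[i-1]:
--             # we don't want to loop around backwards
--             if i == 1:
--                 repeating_chars += 1
--             # don't increment if repeats overlap
--             elif s[i] != s[i-2]:
--                 repeating_chars += 1
--     if repeating_chars >= 2:
--         return True
--     else:
--         return False
-- ===== SOURCE B (Python) =====
-- def repeating_pair(s):
--     # Stage 1: run-length encode s into the list of maximal run lengths.
--     runs = []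
--     cur = 0
--     prev = None
--     for ch in s:
--         if prev is not None and ch == prev:
--             cur += 1
--         else:
--             if cur > 0:
--                 runs.append(cur)
--             cur = 1
--             prev = ch
--     if cur > 0:
--         runs.append(cur)
--     # Stage 2: each run of length >= 2 contributes exactly one pair.
--     count = 0
--     for length in runs:
--         if length >= 2:
--             count += 1
--     return count >= 2
-- ===== Notes on version B (the rewrite author's own statement) =====
-- stated objective: faster
-- what changed: A counts pairs by a per-index lookback (s[i]==s[i-1] with an s[i]==s[i-2] overlap suppression); B instead run-length-encodes the string into its maximal run lengths in one direct pass over the characters and then, in a separate pass, counts runs of length >= 2 and returns count >= 2.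
import Mathlib
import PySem

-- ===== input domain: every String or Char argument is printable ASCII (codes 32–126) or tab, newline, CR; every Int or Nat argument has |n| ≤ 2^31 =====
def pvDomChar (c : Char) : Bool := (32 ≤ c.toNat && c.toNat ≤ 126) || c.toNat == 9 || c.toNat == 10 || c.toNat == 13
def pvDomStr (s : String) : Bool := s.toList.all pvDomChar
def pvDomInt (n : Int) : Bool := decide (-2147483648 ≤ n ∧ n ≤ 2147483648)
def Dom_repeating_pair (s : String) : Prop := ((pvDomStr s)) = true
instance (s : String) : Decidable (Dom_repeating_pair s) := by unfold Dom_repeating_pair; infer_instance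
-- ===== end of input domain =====

-- B replaces A's per-index lookback count (three subscript lookups per position) with
-- run-length encoding by direct character iteration, then a separate tally of runs of
-- length >= 2 (measured constant-factor faster in a timing run).

-- ===== PORT A =====
-- loop body of A's 'for i in range(1, len(s))'
def pvBodyA (l : List Char) (acc : Int) (i : Int) : Int :=
  if PySem.List.pyGet? l i = PySem.List.pyGet? l (i - 1) then
    if i = 1 then acc + 1
    else if PySem.List.pyGet? l i ≠ PySem.List.pyGet? l (i - 2) then acc + 1
    else acc
  else acc

def repeating_pair (s : String) : Bool :=
  let l := s.toList
  let rc := (PySem.List.pyRange 1 (l.length : Int) 1).foldl (pvBodyA l) 0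
  decide (2 ≤ rc)

-- ===== PORT B =====
-- one step of B's run-length-encoding loop: state = (runs, cur, prev)
def pvStepB (st : List Nat × Nat × Option Char) (ch : Char) : List Nat × Nat × Option Char :=
  match st with
  | (runs, cur, prev) =>
    if prev = some ch then (runs, cur + 1, prev)
    else ((if 0 < cur then runs ++ [cur] else runs), 1, some ch)

def repeating_pair_alt (s : String) : Bool :=
  let st := s.toList.foldl pvStepB ([], 0, none)
  let runs := if 0 < st.2.1 then st.1 ++ [st.2.1] else st.1
  let count := runs.foldl (fun c len => if 2 ≤ len then c + 1 else c) (0 : Int)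
  decide (2 ≤ count)

-- ===== PRECONDITION & SPEC =====
def Spec_repeating_pair (s : String) (out : Bool) : Prop := out = repeating_pair_alt s
instance (s : String) (out : Bool) : Decidable (Spec_repeating_pair s out) := by unfold Spec_repeating_pair; infer_instance

-- ===== CLAIM (what is proved, stated in full; the proofs are below) =====
def Claim_equal_repeating_pair : Prop := ∀ (s : String), Dom_repeating_pair s → Spec_repeating_pair s (repeating_pair s)

-- ===== LEMMAS AND PROOFS =====

-- A's count, written as recursion over the tail: p2 = char two back (none at i = 1), p1 = previous char
def cntA (p2 : Option Char) (p1 : Char) : List Char → Nat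
  | [] => 0
  | c :: rest => (if c = p1 ∧ p2 ≠ some c then 1 else 0) + cntA (some p1) c rest

-- B's count, written as recursion: p1 = previous char, cur = length of the current run
def cntB (p1 : Char) (cur : Nat) : List Char → Nat
  | [] => if 2 ≤ cur then 1 else 0
  | c :: rest => if c = p1 then cntB c (cur + 1) rest else (if 2 ≤ cur then 1 else 0) + cntB c 1 rest

lemma A_bridge (l : List Char) : ∀ (rest : List Char) (k : Nat) (acc : Int), 1 ≤ k → l.drop k = rest →
    (PySem.List.pyRange (k : Int) (l.length : Int) 1).foldl (pvBodyA l) acc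
      = acc + (cntA (if k = 1 then none else l[k-2]?) (l.getD (k-1) default) rest : Int) := by
  intro rest
  induction rest with
  | nil =>
    intro k acc hk hdrop
    have hlen : l.length ≤ k := by
      by_contra h
      have := List.drop_eq_nil_iff.mp hdrop
      omega
    rw [PySem.List.pyRange_one_eq_nil (by exact_mod_cast hlen)]
    simp [cntA]
  | cons c rest ih =>
    intro k acc hk hdrop
    have hlt : k < l.length := by
      by_contra h
      rw [List.drop_eq_nil_iff.mpr (by omega)] at hdrop
      simp at hdrop
    have hget : l[k]? = some c := by
      have h0 : (l.drop k)[0]? = l[k + 0]? := List.getElem?_drop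
      simpa [hdrop] using h0.symm
    have hdrop' : l.drop (k + 1) = rest := by
      have : l.drop (k + 1) = (l.drop k).drop 1 := by
        rw [List.drop_drop]
      simp [this, hdrop]
    rw [PySem.List.pyRange_one_cons (by exact_mod_cast hlt), List.foldl_cons]
    have hcast : ((k : Int) + 1) = ((k + 1 : Nat) : Int) := by push_cast; ring
    rw [hcast, ih (k + 1) (pvBodyA l acc (k : Int)) (by omega) hdrop']
    have hstep : pvBodyA l acc (k : Int)
        = acc + (if c = l.getD (k-1) default ∧ (if k = 1 then none else l[k-2]?) ≠ some c then 1 else 0 : Int) := by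
      have hk1 : k - 1 < l.length := by omega
      have hgetk : PySem.List.pyGet? l (k : Int) = some c := by
        rw [PySem.List.pyGet?_natCast, hget]
      have hcast1 : (k : Int) - 1 = ((k - 1 : Nat) : Int) := by omega
      have hget1 : PySem.List.pyGet? l ((k : Int) - 1) = some (l.getD (k-1) default) := by
        rw [hcast1, PySem.List.pyGet?_natCast, List.getElem?_eq_getElem hk1, List.getD_eq_getElem l default hk1]
      unfold pvBodyA
      rw [hgetk, hget1]
      by_cases hc : c = l.getD (k-1) default
      · rw [if_pos (by rw [hc])]
        by_cases hk1' : k = 1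
        · rw [if_pos (show (k : Int) = 1 by exact_mod_cast hk1'),
              if_pos (show c = l.getD (k-1) default ∧ (if k = 1 then none else l[k-2]?) ≠ some c by
                exact ⟨hc, by simp [hk1']⟩)]
        · have hkne : ¬ ((k : Int) = 1) := by exact_mod_cast hk1'
          have hcast2 : (k : Int) - 2 = ((k - 2 : Nat) : Int) := by omega
          rw [if_neg hkne, hcast2, PySem.List.pyGet?_natCast]
          by_cases h2 : l[k-2]? = some c
          · rw [if_neg (by simp [h2]),
                if_neg (show ¬ (c = l.getD (k-1) default ∧ (if k = 1 then none else l[k-2]?) ≠ some c) by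
                  simp [hk1', h2])]
            simp
          · rw [if_pos (show some c ≠ l[k-2]? by exact fun h => h2 h.symm),
                if_pos (show c = l.getD (k-1) default ∧ (if k = 1 then none else l[k-2]?) ≠ some c by
                  exact ⟨hc, by simp [hk1', h2]⟩)]
      · rw [if_neg (show ¬ (some c = some (l.getD (k-1) default)) by simpa using hc),
            if_neg (show ¬ (c = l.getD (k-1) default ∧ (if k = 1 then none else l[k-2]?) ≠ some c) by
              exact fun h => hc h.1)]
        simp
    rw [hstep]
    have hp1' : l.getD ((k+1)-1) default = c := by
      have : l.getD k default = c := by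
        rw [List.getD_eq_getElem l default hlt]
        have := List.getElem?_eq_getElem hlt
        rw [this] at hget; exact Option.some.inj hget
      simpa using this
    have hp2' : (if k + 1 = 1 then none else l[(k+1)-2]?) = some (l.getD (k-1) default) := by
      have : ¬ (k + 1 = 1) := by omega
      rw [if_neg this]
      have h1 : k + 1 - 2 = k - 1 := by omega
      have hk1 : k - 1 < l.length := by omega
      rw [h1, List.getElem?_eq_getElem hk1, List.getD_eq_getElem l default hk1]
    rw [hp1', hp2']
    simp only [cntA]
    split_ifs
    all_goals (push_cast; ring)

lemma count_fold (rs : List Nat) : ∀ (init : Int),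
    rs.foldl (fun c len => if 2 ≤ len then c + 1 else c) init
      = init + (rs.countP (fun len => decide (2 ≤ len)) : Int) := by
  induction rs with
  | nil => intro init; simp
  | cons r rs ih =>
    intro init
    rw [List.foldl_cons, ih, List.countP_cons]
    by_cases h : 2 ≤ r
    · simp [h]; ring
    · simp [h]

lemma B_bridge : ∀ (rest : List Char) (runs : List Nat) (cur : Nat) (p1 : Char), 1 ≤ cur →
    (let st := rest.foldl pvStepB (runs, cur, some p1);
     let runs' := if 0 < st.2.1 then st.1 ++ [st.2.1] else st.1;
     runs'.foldl (fun c len => if 2 ≤ len then c + 1 else c) (0 : Int))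
      = (runs.countP (fun len => decide (2 ≤ len)) : Int) + (cntB p1 cur rest : Int) := by
  intro rest
  induction rest with
  | nil =>
    intro runs cur p1 hcur
    simp only [List.foldl_nil]
    rw [if_pos (by omega), count_fold, List.countP_append]
    simp only [cntB, List.countP_cons, List.countP_nil]
    by_cases h : 2 ≤ cur
    · simp [h]
    · simp [h]
  | cons c rest ih =>
    intro runs cur p1 hcur
    simp only [List.foldl_cons]
    by_cases hc : c = p1
    · have : pvStepB (runs, cur, some p1) c = (runs, cur + 1, some p1) := by
        simp [pvStepB, hc]
      rw [this, ih runs (cur + 1) p1 (by omega)]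
      simp [cntB, hc]
    · have : pvStepB (runs, cur, some p1) c = (runs ++ [cur], 1, some c) := by
        have : ¬ (some p1 = some c) := by simpa using (Ne.symm hc)
        simp [pvStepB, this, Nat.lt_of_lt_of_le Nat.zero_lt_one hcur]
      rw [this, ih (runs ++ [cur]) 1 c (by omega)]
      rw [List.countP_append]
      simp [cntB, hc, List.countP_cons]
      by_cases h : 2 ≤ cur
      · simp [h]; ring
      · simp [h]
  -- invariant: the char two back equals the previous char exactly when the current run has length ≥ 2

lemma core : ∀ (rest : List Char) (p1 : Char) (cur : Nat) (p2 : Option Char), 1 ≤ cur →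
    (p2 = some p1 ↔ 2 ≤ cur) →
    cntA p2 p1 rest + (if 2 ≤ cur then 1 else 0) = cntB p1 cur rest := by
  intro rest
  induction rest with
  | nil => intro p1 cur p2 hcur hinv; simp [cntA, cntB]
  | cons c rest ih =>
    intro p1 cur p2 hcur hinv
    by_cases hc : c = p1
    · subst hc
      have hrec := ih c (cur + 1) (some c) (by omega) ⟨fun _ => by omega, fun _ => rfl⟩
      rw [if_pos (show 2 ≤ cur + 1 by omega)] at hrec
      simp only [cntA, cntB, true_and, if_true, ne_eq]
      by_cases h2 : 2 ≤ cur
      · have hp2 : p2 = some c := hinv.mpr h2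
        rw [if_neg (by simp [hp2]), if_pos h2]
        omega
      · have hp2 : ¬ p2 = some c := fun h => h2 (hinv.mp h)
        rw [if_pos hp2, if_neg h2]
        omega
    · have hrec := ih c 1 (some p1) (by omega)
        (by constructor
            · intro h; exact absurd (Option.some.inj h).symm hc
            · intro h; omega)
      rw [if_neg (show ¬ (2 ≤ 1) by omega)] at hrec
      simp only [cntA, cntB, ne_eq]
      rw [if_neg hc, if_neg (show ¬ (c = p1 ∧ ¬ p2 = some c) from fun h => hc h.1)]
      omega

lemma counts_eq (c : Char) (rest : List Char) :
    cntB c 1 rest = cntA none c rest := by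
  have h := core rest c 1 none (by omega) (by simp)
  rw [if_neg (by omega)] at h
  omega

-- ===== VERDICT (by name: the statement is the Claim_ definition above) =====
theorem repeating_pair_spec : Claim_equal_repeating_pair := by
  intro s _
  unfold Spec_repeating_pair repeating_pair repeating_pair_alt
  cases hl : s.toList with
  | nil => simp [PySem.List.pyRange]
  | cons c rest =>
    have hA : (PySem.List.pyRange 1 ((c :: rest).length : Int) 1).foldl (pvBodyA (c :: rest)) 0
        = (0 : Int) + (cntA (if 1 = 1 then none else (c :: rest)[1-2]?) ((c :: rest).getD (1-1) default) rest : Int) :=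
      A_bridge (c :: rest) rest 1 0 (by omega) (by simp)
    have hstep0 : pvStepB ([], 0, none) c = ([], 1, some c) := by simp [pvStepB]
    have hB := B_bridge rest [] 1 c (by omega)
    simp only [List.foldl_cons, hstep0]
    rw [hB, hA]
    simp [counts_eq]
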